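-- pv_equiv track=rewrite | github.com/SIDd999-cloud/shiftplanner | backend/constraints_model/hard/skill_matching.py | _skill_satisfied
-- ===== SOURCE A (Python) =====
-- def _skill_satisfied(
--     required_skill: str,
--     person_skills: set[str],
--     skill_hierarchy: dict[str, set[str]],
-- ) -> bool:
--     """Return True if the person holds the required skill directly or via hierarchy.
--
--     skill_hierarchy maps a higher skill to the set of lower skills it covers.
--     A required skill is satisfied if the person holds it exactly, or holds a
--     higher skill that transitively covers it.
--     """
--     if required_skill in person_skills:
--         return True
--     for held_skill in person_skills:
--         covered = skill_hierarchy.get(held_skill, set())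
--         if required_skill in covered:
--             return True
--     return False
-- ===== SOURCE B (Python) =====
-- def _skill_satisfied(
--     required_skill: str,
--     person_skills: set[str],
--     skill_hierarchy: dict[str, set[str]],
-- ) -> bool:
--     """Scan the hierarchy once: collect every skill that satisfies the
--     requirement (the skill itself plus every higher skill covering it),
--     then intersect with the person's skills."""
--     candidates = {required_skill}
--     for higher, covered in skill_hierarchy.items():
--         if required_skill in covered:
--             candidates.add(higher)
--     return bool(candidates & person_skills)
-- ===== Notes on version B (the rewrite author's own statement) =====
-- stated objective: alternative
-- what changed: B scans skill_hierarchy.items() once to build the set of satisfying skills (required plus every higher skill covering it) and returns whether that set intersects person_skills, instead of A's per-held-skill forward dict lookup.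
import Mathlib
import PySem

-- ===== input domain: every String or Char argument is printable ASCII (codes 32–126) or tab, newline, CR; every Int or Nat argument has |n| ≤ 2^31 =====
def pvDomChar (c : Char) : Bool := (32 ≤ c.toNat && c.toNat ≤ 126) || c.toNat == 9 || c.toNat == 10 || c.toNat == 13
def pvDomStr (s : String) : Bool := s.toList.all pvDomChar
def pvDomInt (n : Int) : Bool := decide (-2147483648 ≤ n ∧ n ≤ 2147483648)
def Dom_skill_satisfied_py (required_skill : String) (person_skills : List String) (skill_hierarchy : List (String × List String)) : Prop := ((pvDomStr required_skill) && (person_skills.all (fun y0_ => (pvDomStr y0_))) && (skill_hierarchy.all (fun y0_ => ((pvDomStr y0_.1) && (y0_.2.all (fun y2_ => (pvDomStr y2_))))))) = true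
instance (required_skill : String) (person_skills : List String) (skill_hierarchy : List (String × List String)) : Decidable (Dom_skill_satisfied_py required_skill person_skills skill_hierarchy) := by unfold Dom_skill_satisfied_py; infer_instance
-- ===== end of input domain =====

-- B builds the set of satisfying skills from one scan of the hierarchy items and intersects
-- it with the person's skills, instead of A's per-held-skill forward dict lookup (alternative).

-- ===== PORT A =====
-- the 'for held_skill in person_skills' loop with early return (result is a bool, so set iteration order cannot matter)
def pvALoop (required_skill : String) (skill_hierarchy : List (String × List String)) : List String → Bool
  | [] => false
  | held :: rest =>
    if ((List.lookup held skill_hierarchy).getD []).contains required_skill then true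
    else pvALoop required_skill skill_hierarchy rest

def skill_satisfied_py (required_skill : String) (person_skills : List String) (skill_hierarchy : List (String × List String)) : Bool :=
  if person_skills.contains required_skill then true
  else pvALoop required_skill skill_hierarchy person_skills

-- ===== PORT B =====
def skill_satisfied_py_alt (required_skill : String) (person_skills : List String) (skill_hierarchy : List (String × List String)) : Bool :=
  let candidates := skill_hierarchy.foldl
    (fun c kv => if kv.2.contains required_skill then PySem.Set.add c kv.1 else c)
    (PySem.Set.ofList [required_skill])
  !(PySem.Set.inter candidates person_skills).isEmpty

-- ===== PRECONDITION & SPEC =====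
-- Pre_ excludes association lists with duplicate keys, which no Python dict produces and on
-- which first-match lookup (A's port) and a full items scan (B's port) legitimately differ.
def Pre_skill_satisfied_py (required_skill : String) (person_skills : List String) (skill_hierarchy : List (String × List String)) : Prop :=
  (skill_hierarchy.map Prod.fst).Nodup
instance (required_skill : String) (person_skills : List String) (skill_hierarchy : List (String × List String)) : Decidable (Pre_skill_satisfied_py required_skill person_skills skill_hierarchy) := by unfold Pre_skill_satisfied_py; infer_instance

def pvWitness_skill_satisfied_py : String × List String × (List (String × List String)) :=
  ("r", ["x"], [("x", ["r"]), ("y", [])])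

def Spec_skill_satisfied_py (required_skill : String) (person_skills : List String) (skill_hierarchy : List (String × List String)) (out : Bool) : Prop := out = skill_satisfied_py_alt required_skill person_skills skill_hierarchy
instance (required_skill : String) (person_skills : List String) (skill_hierarchy : List (String × List String)) (out : Bool) : Decidable (Spec_skill_satisfied_py required_skill person_skills skill_hierarchy out) := by unfold Spec_skill_satisfied_py; infer_instance

-- ===== CLAIM (what is proved, stated in full; the proofs are below) =====
def Claim_equal_skill_satisfied_py : Prop := ∀ (required_skill : String) (person_skills : List String) (skill_hierarchy : List (String × List String)), Dom_skill_satisfied_py required_skill person_skills skill_hierarchy → Pre_skill_satisfied_py required_skill person_skills skill_hierarchy → Spec_skill_satisfied_py required_skill person_skills skill_hierarchy (skill_satisfied_py required_skill person_skills skill_hierarchy)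

-- ===== LEMMAS AND PROOFS =====

-- A's loop returns true iff some held skill's (first-match) covered set contains the required skill
theorem pvALoop_iff (r : String) (sh : List (String × List String)) (ps : List String) :
    pvALoop r sh ps = true ↔ ∃ h ∈ ps, r ∈ (List.lookup h sh).getD [] := by
  induction ps with
  | nil => simp [pvALoop]
  | cons h t ih =>
    simp only [pvALoop]
    split
    · rename_i hc
      simp only [List.contains_eq_mem, decide_eq_true_eq] at hc
      simp only [true_iff]
      exact ⟨h, List.mem_cons_self, hc⟩
    · rename_i hc
      simp only [List.contains_eq_mem, decide_eq_true_eq] at hc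
      rw [ih]
      constructor
      · rintro ⟨x, hx, hr⟩; exact ⟨x, List.mem_cons_of_mem _ hx, hr⟩
      · rintro ⟨x, hx, hr⟩
        rcases List.mem_cons.mp hx with rfl | hx'
        · exact absurd hr hc
        · exact ⟨x, hx', hr⟩

-- under unique keys, first-match lookup membership is membership of some pair
theorem lookup_mem_iff (r k : String) (sh : List (String × List String))
    (hnd : (sh.map Prod.fst).Nodup) :
    r ∈ (List.lookup k sh).getD [] ↔ ∃ p ∈ sh, p.1 = k ∧ r ∈ p.2 := by
  induction sh with
  | nil => simp [List.lookup]
  | cons p t ih =>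
    simp only [List.map_cons, List.nodup_cons] at hnd
    by_cases hk : p.1 = k
    · subst hk
      simp only [List.lookup, beq_self_eq_true, Option.getD_some]
      constructor
      · intro hr; exact ⟨p, List.mem_cons_self, rfl, hr⟩
      · rintro ⟨q, hq, hq1, hr⟩
        rcases List.mem_cons.mp hq with rfl | hq'
        · exact hr
        · exact absurd (hq1 ▸ List.mem_map_of_mem hq') hnd.1
    · have hb : (k == p.1) = false := beq_eq_false_iff_ne.mpr (fun h => hk h.symm)
      simp only [List.lookup, hb]
      rw [ih hnd.2]
      constructor
      · rintro ⟨q, hq, hq1, hr⟩; exact ⟨q, List.mem_cons_of_mem _ hq, hq1, hr⟩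
      · rintro ⟨q, hq, hq1, hr⟩
        rcases List.mem_cons.mp hq with rfl | hq'
        · exact absurd hq1 hk
        · exact ⟨q, hq', hq1, hr⟩

-- membership in B's candidates accumulator
theorem pvCandidates_mem (r x : String) (sh : List (String × List String)) (init : PySem.Set String) :
    x ∈ sh.foldl (fun c kv => if kv.2.contains r then PySem.Set.add c kv.1 else c) init ↔
      x ∈ init ∨ ∃ p ∈ sh, p.1 = x ∧ r ∈ p.2 := by
  induction sh generalizing init with
  | nil => simp
  | cons p t ih =>
    simp only [List.foldl_cons]
    rw [ih]
    by_cases hc : p.2.contains r = true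
    · simp only [if_pos hc, PySem.Set.mem_add]
      simp only [List.contains_eq_mem, decide_eq_true_eq] at hc
      constructor
      · rintro (⟨hi | rfl⟩ | ⟨q, hq, hq1, hr⟩)
        · exact Or.inl hi
        · exact Or.inr ⟨p, List.mem_cons_self, rfl, hc⟩
        · exact Or.inr ⟨q, List.mem_cons_of_mem _ hq, hq1, hr⟩
      · rintro (hi | ⟨q, hq, hq1, hr⟩)
        · exact Or.inl (Or.inl hi)
        · rcases List.mem_cons.mp hq with rfl | hq'
          · exact Or.inl (Or.inr hq1.symm)
          · exact Or.inr ⟨q, hq', hq1, hr⟩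
    · simp only [if_neg hc]
      simp only [List.contains_eq_mem, decide_eq_true_eq] at hc
      constructor
      · rintro (hi | ⟨q, hq, hq1, hr⟩)
        · exact Or.inl hi
        · exact Or.inr ⟨q, List.mem_cons_of_mem _ hq, hq1, hr⟩
      · rintro (hi | ⟨q, hq, hq1, hr⟩)
        · exact Or.inl hi
        · rcases List.mem_cons.mp hq with rfl | hq'
          · exact absurd hr hc
          · exact Or.inr ⟨q, hq', hq1, hr⟩

theorem alt_iff (r : String) (ps : List String) (sh : List (String × List String)) :
    skill_satisfied_py_alt r ps sh = true ↔
      r ∈ ps ∨ ∃ p ∈ sh, p.1 ∈ ps ∧ r ∈ p.2 := by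
  simp only [skill_satisfied_py_alt, Bool.not_eq_true', List.isEmpty_eq_false_iff_exists_mem]
  constructor
  · rintro ⟨x, hx⟩
    have hx' := (PySem.Set.mem_inter _ _ _).mp hx
    rcases (pvCandidates_mem r x sh _).mp hx'.1 with hi | ⟨p, hp, hp1, hr⟩
    · simp only [PySem.Set.mem_ofList, List.mem_singleton] at hi
      subst hi; exact Or.inl hx'.2
    · exact Or.inr ⟨p, hp, hp1 ▸ hx'.2, hr⟩
  · rintro (hr | ⟨p, hp, hp1, hr⟩)
    · exact ⟨r, (PySem.Set.mem_inter _ _ _).mpr ⟨(pvCandidates_mem r r sh _).mpr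
        (Or.inl ((PySem.Set.mem_ofList _ _).mpr (List.mem_singleton.mpr rfl))), hr⟩⟩
    · exact ⟨p.1, (PySem.Set.mem_inter _ _ _).mpr ⟨(pvCandidates_mem r p.1 sh _).mpr
        (Or.inr ⟨p, hp, rfl, hr⟩), hp1⟩⟩

-- ===== VERDICT (by name: the statement is the Claim_ definition above) =====
theorem skill_satisfied_py_spec : Claim_equal_skill_satisfied_py := by
  intro r ps sh _ hpre
  unfold Spec_skill_satisfied_py
  rw [Bool.eq_iff_iff, alt_iff]
  unfold skill_satisfied_py
  by_cases hr : ps.contains r = true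
  · simp only [if_pos hr, true_iff]
    simp only [List.contains_eq_mem, decide_eq_true_eq] at hr
    exact Or.inl hr
  · simp only [if_neg hr, pvALoop_iff]
    simp only [List.contains_eq_mem, decide_eq_true_eq] at hr
    constructor
    · rintro ⟨h, hh, hm⟩
      rcases (lookup_mem_iff r h sh hpre).mp hm with ⟨p, hp, hp1, hrp⟩
      exact Or.inr ⟨p, hp, hp1 ▸ hh, hrp⟩
    · rintro (hrm | ⟨p, hp, hp1, hrp⟩)
      · exact absurd hrm hr
      · exact ⟨p.1, hp1, (lookup_mem_iff r p.1 sh hpre).mpr ⟨p, hp, rfl, hrp⟩⟩
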